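-- pv_equiv track=rewrite | github.com/pypi-data/pypi-mirror-62 | packages/mxu/mxu-0.0.6.tar.gz/mxu-0.0.6/mxu/itertools.py | iter_lookahead
-- ===== SOURCE A (Python) =====
-- import typing as t
--
-- ElementT = t.TypeVar("ElementT")
--
-- def iter_lookahead(
--     iterable: t.Iterable[ElementT],
-- ) -> t.Iterator[t.Tuple[ElementT, t.Optional[ElementT]]]:
--     iterator = iter(iterable)
--     current_element = next(iterator, None)
--     while current_element is not None:
--         next_element = next(iterator, None)
--         yield current_element, next_element
--         current_element = next_element
-- ===== SOURCE B (Python) =====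
-- def iter_lookahead(iterable):
--     lst = list(iterable)
--     yield from zip(lst, lst[1:])
--     if lst:
--         yield lst[-1], None
-- ===== Notes on version B (the rewrite author's own statement) =====
-- stated objective: idiomatic
-- what changed: Replaces the stateful while-loop over next() with materialising the input once, yielding zip(lst, lst[1:]) and then one final (last, None) pair.
import Mathlib
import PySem

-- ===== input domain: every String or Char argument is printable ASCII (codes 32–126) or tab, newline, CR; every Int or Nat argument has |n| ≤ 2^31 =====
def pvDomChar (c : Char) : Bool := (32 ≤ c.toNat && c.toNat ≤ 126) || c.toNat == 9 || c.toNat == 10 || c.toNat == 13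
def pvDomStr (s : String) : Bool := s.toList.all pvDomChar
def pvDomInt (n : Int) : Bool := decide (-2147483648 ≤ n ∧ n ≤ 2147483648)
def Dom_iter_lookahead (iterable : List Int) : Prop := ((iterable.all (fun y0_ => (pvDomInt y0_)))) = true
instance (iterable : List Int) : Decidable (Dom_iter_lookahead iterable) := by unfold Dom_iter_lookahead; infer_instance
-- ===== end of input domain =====

-- B replaces A's stateful while-loop over next() with zip(lst, lst[1:]) plus a final (last, None) pair (idiomatic; B materialises the iterable, trading laziness).
-- ===== PORT A =====
-- while current_element is not None: yield (current, next); current = next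
def iter_lookahead_loop (current : Int) (rest : List Int) : List (Int × Option Int) :=
  match rest with
  | [] => [(current, none)]
  | x :: rest' => (current, some x) :: iter_lookahead_loop x rest'

def iter_lookahead (iterable : List Int) : List (Int × Option Int) :=
  match iterable with
  | [] => []
  | x :: rest => iter_lookahead_loop x rest

-- ===== PORT B =====
-- zip the list with its tail, then append (last, None) if nonempty
def iter_lookahead_alt (iterable : List Int) : List (Int × Option Int) :=
  (List.zip iterable iterable.tail).map (fun p => (p.1, some p.2)) ++
    (match iterable.getLast? with
     | some l => [(l, none)]
     | none => [])

-- ===== PRECONDITION & SPEC =====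
def Spec_iter_lookahead (iterable : List Int) (out : List (Int × Option Int)) : Prop := out = iter_lookahead_alt iterable
instance (iterable : List Int) (out : List (Int × Option Int)) : Decidable (Spec_iter_lookahead iterable out) := by unfold Spec_iter_lookahead; infer_instance

-- ===== CLAIM (what is proved, stated in full; the proofs are below) =====
def Claim_equal_iter_lookahead : Prop := ∀ (iterable : List Int), Dom_iter_lookahead iterable → Spec_iter_lookahead iterable (iter_lookahead iterable)

-- ===== LEMMAS AND PROOFS =====

lemma loop_eq (rest : List Int) : ∀ c : Int,
    iter_lookahead_loop c rest =
      (List.zip (c :: rest) rest).map (fun p => (p.1, some p.2)) ++ [ ((c :: rest).getLast (by simp), none) ] := by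
  induction rest with
  | nil => intro c; simp [iter_lookahead_loop]
  | cons x rest ih =>
      intro c
      simp [iter_lookahead_loop, ih x, List.getLast]

-- ===== VERDICT (by name: the statement is the Claim_ definition above) =====
theorem iter_lookahead_spec : Claim_equal_iter_lookahead := by
  intro xs _
  unfold Spec_iter_lookahead
  match xs with
  | [] => rfl
  | c :: rest =>
      show iter_lookahead_loop c rest = _
      rw [loop_eq rest c]
      simp [iter_lookahead_alt, List.getLast?_eq_getLast]
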